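-- pv_equiv track=rewrite | github.com/kameelkhabaz/uchicago_classes | cmsc12100/short-exercises-kameelkhabaz/prev_final_probs/other_probs.py | gen_committee
-- ===== SOURCE A (Python) =====
-- def gen_committee(potential_members, diversity_dimension, target_per_group):
--     group_names = {}
--     for pot_mem in potential_members:
--         grp = pot_mem[diversity_dimension]
--         if grp not in group_names:
--             group_names[grp] = []
--         if len(group_names[grp]) < target_per_group:
--             group_names[grp].append(pot_mem["Name"])
--     return group_names
-- ===== SOURCE B (Python) =====
-- def gen_committee(potential_members, diversity_dimension, target_per_group):
--     # Pass 1: distinct dimension values in first-appearance order.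
--     seen = []
--     for m in potential_members:
--         g = m[diversity_dimension]
--         if g not in seen:
--             seen.append(g)
--     cap = max(0, target_per_group)
--     # Pass 2: per group, scan all members for that group's names, keep the first cap.
--     return {g: [m["Name"] for m in potential_members
--                 if m[diversity_dimension] == g][:cap]
--             for g in seen}
-- ===== Notes on version B (the rewrite author's own statement) =====
-- stated objective: alternative
-- what changed: A builds the capped dict in one interleaved pass (create-if-missing, append while below target); B first collects the distinct dimension values in first-appearance order, then for each value rescans the whole member list to gather its names and truncates to max(0, target) - nested per-group scans instead of a single grouping pass.
-- outside the precondition, e.g. on gen_committee([{'d': 'x'}], 'd', 0): A returns {'x': []}, B raises KeyError; on gen_committee([{'d': 'x', 'Name': 'a'}, {'d': 'x'}], 'd', 1): A returns {'x': ['a']}, B raises KeyError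
import Mathlib
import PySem

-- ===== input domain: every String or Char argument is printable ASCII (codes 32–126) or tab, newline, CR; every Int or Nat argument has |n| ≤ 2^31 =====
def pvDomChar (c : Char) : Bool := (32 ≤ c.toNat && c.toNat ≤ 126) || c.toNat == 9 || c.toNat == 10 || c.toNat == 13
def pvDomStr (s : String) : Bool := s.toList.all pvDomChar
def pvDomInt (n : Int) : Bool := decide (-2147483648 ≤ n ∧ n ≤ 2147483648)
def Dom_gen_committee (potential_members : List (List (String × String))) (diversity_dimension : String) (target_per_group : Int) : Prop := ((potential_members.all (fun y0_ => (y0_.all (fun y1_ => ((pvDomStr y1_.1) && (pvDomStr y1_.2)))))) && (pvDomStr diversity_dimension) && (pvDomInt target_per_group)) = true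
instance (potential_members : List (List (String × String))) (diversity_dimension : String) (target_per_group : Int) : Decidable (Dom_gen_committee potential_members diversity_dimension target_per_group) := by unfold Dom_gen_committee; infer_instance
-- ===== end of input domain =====

-- B replaces A's single interleaved grouping loop by nested per-group scans: collect the distinct dimension values first, then rescan the member list once per group and truncate (objective: alternative decomposition; not faster).


-- ===== PORT A =====
-- One interleaved loop: lazily create the group, append the name only while the group is below target.
-- pot_mem[key] is ported as (Dict.mk mem).getD key "" — exact under Pre_ (the key is present; Python raises KeyError otherwise).
def gen_committee (potential_members : List (List (String × String))) (diversity_dimension : String) (target_per_group : Int) : List (String × List String) :=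
  (potential_members.foldl
    (fun g mem =>
      let grp := (PySem.Dict.mk mem).getD diversity_dimension ""
      let g := if g.contains grp then g else g.insert grp []
      if ((g.getD grp []).length : Int) < target_per_group then
        g.modify grp [] (fun l => l ++ [(PySem.Dict.mk mem).getD "Name" ""])
      else g)
    PySem.Dict.empty).items

-- ===== PORT B =====
-- Pass 1: distinct dimension values in first-appearance order; pass 2: per value,
-- filter the whole member list for its names and take the first max(0, target).
def gen_committee_alt (potential_members : List (List (String × String))) (diversity_dimension : String) (target_per_group : Int) : List (String × List String) :=
  let seen := potential_members.foldl
    (fun ks mem =>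
      let g := (PySem.Dict.mk mem).getD diversity_dimension ""
      if ks.contains g then ks else ks ++ [g])
    ([] : List String)
  let cap : Int := max 0 target_per_group
  seen.map (fun g =>
    (g, ((potential_members.filter
            (fun mem => (PySem.Dict.mk mem).getD diversity_dimension "" == g)).map
          (fun mem => (PySem.Dict.mk mem).getD "Name" "")).take cap.toNat))

-- ===== PRECONDITION & SPEC =====
-- Pre_ excludes exactly the inputs on which a member dict lacks the diversity_dimension key or the
-- "Name" key: Python A raises KeyError on the former and on the latter whenever it reads the name;
-- in the remaining "Name"-missing corners (group already full, or target ≤ 0) A still returns but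
-- B's natural algorithm raises KeyError, so they stay excluded (see cites).
def Pre_gen_committee (potential_members : List (List (String × String))) (diversity_dimension : String) (target_per_group : Int) : Prop :=
  ∀ mem ∈ potential_members,
    (PySem.Dict.mk mem).contains diversity_dimension = true ∧ (PySem.Dict.mk mem).contains "Name" = true
instance (potential_members : List (List (String × String))) (diversity_dimension : String) (target_per_group : Int) : Decidable (Pre_gen_committee potential_members diversity_dimension target_per_group) := by unfold Pre_gen_committee; infer_instance

def pvWitness_gen_committee : (List (List (String × String))) × String × Int :=
  ([[("d", "x"), ("Name", "ann")], [("d", "y"), ("Name", "bob")], [("d", "x"), ("Name", "cal")]], "d", 1)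

def Spec_gen_committee (potential_members : List (List (String × String))) (diversity_dimension : String) (target_per_group : Int) (out : List (String × List String)) : Prop := out = gen_committee_alt potential_members diversity_dimension target_per_group
instance (potential_members : List (List (String × String))) (diversity_dimension : String) (target_per_group : Int) (out : List (String × List String)) : Decidable (Spec_gen_committee potential_members diversity_dimension target_per_group out) := by unfold Spec_gen_committee; infer_instance

-- ===== CLAIM (what is proved, stated in full; the proofs are below) =====
def Claim_equal_gen_committee : Prop := ∀ (potential_members : List (List (String × String))) (diversity_dimension : String) (target_per_group : Int), Dom_gen_committee potential_members diversity_dimension target_per_group → Pre_gen_committee potential_members diversity_dimension target_per_group → Spec_gen_committee potential_members diversity_dimension target_per_group (gen_committee potential_members diversity_dimension target_per_group)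

-- ===== LEMMAS AND PROOFS =====

-- Cap a dict's values at t elements each.
def capD (t : Nat) (g : PySem.Dict String (List String)) : PySem.Dict String (List String) :=
  PySem.Dict.mk (g.items.map (fun p => (p.1, p.2.take t)))

theorem contains_capD (t : Nat) (g : PySem.Dict String (List String)) (k : String) :
    (capD t g).contains k = g.contains k := by
  simp [capD, PySem.Dict.contains, List.any_map, Function.comp_def]

theorem keys_capD (t : Nat) (g : PySem.Dict String (List String)) :
    (capD t g).keys = g.keys := by
  simp [capD, PySem.Dict.keys, List.map_map, Function.comp_def]

theorem get?_capD (t : Nat) (g : PySem.Dict String (List String)) (k : String) :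
    (capD t g).get? k = (g.get? k).map (fun l => l.take t) := by
  simp only [capD, PySem.Dict.get?]
  rw [List.find?_map]
  cases h : g.items.find? (fun p => p.1 == k) <;> simp [Function.comp_def, h]

theorem getD_capD (t : Nat) (g : PySem.Dict String (List String)) (k : String) :
    (capD t g).getD k [] = (g.getD k []).take t := by
  simp only [PySem.Dict.getD, get?_capD]
  cases g.get? k <;> simp

theorem capD_insert (t : Nat) (g : PySem.Dict String (List String)) (k : String) (v : List String) :
    capD t (g.insert k v) = (capD t g).insert k (v.take t) := by
  simp only [capD, PySem.Dict.insert]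
  have hc : ((g.items.map (fun p => (p.1, p.2.take t))).any fun p => p.1 == k)
      = (g.items.any fun p => p.1 == k) := by
    simp [List.any_map, Function.comp_def]
  by_cases h : (g.items.any fun p => p.1 == k) = true
  · simp only [PySem.Dict.contains, h, hc, if_pos]
    simp only [List.map_map]
    congr 1
    apply List.map_congr_left
    intro p _
    by_cases hp : p.1 = k <;> simp [hp]
  · simp only [PySem.Dict.contains, h, hc, if_neg, Bool.not_eq_true]
    simp

-- Re-inserting the value already stored at k changes nothing (keys nodup).
theorem insert_get?_self (g : PySem.Dict String (List String)) (hnd : g.keys.Nodup)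
    (k : String) (v : List String) (hv : g.get? k = some v) : g.insert k v = g := by
  have hfind : ∃ pr, g.items.find? (fun p => p.1 == k) = some pr ∧ pr.2 = v := by
    rcases h2 : g.items.find? (fun p => p.1 == k) with _ | pr
    · simp [PySem.Dict.get?, h2] at hv
    · exact ⟨pr, h2, by simpa [PySem.Dict.get?, h2] using hv⟩
  obtain ⟨pr, h2, hpr2⟩ := hfind
  have hprmem := List.mem_of_find?_eq_some h2
  have hprk : pr.1 = k := by simpa using (List.find?_eq_some_iff_append.mp h2).1
  have hc : g.contains k = true := by
    simp only [PySem.Dict.contains]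
    exact List.any_of_mem hprmem (by simp [hprk])
  apply PySem.Dict.ext
  simp only [PySem.Dict.insert, hc, if_pos]
  conv_rhs => rw [← List.map_id g.items]
  apply List.map_congr_left
  intro p hp
  by_cases hpk : p.1 = k
  · simp only [hpk, beq_self_eq_true, if_pos, id]
    have hinj := List.inj_on_of_nodup_map (f := Prod.fst) (by simpa [PySem.Dict.keys] using hnd)
    have hppr : p = pr := hinj hp hprmem (by rw [hpk, hprk])
    rw [hppr]
    exact (Prod.ext hprk hpr2).symm
  · simp [hpk]

-- The two loop bodies, named for the induction (stepB is the UNCAPPED grouping loop;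
-- A is shown equal to capD ∘ foldl stepB, and B's nested scans are shown to read off that dict).
def stepA (dim : String) (target : Int) (g : PySem.Dict String (List String)) (mem : List (String × String)) : PySem.Dict String (List String) :=
  let grp := (PySem.Dict.mk mem).getD dim ""
  let g := if g.contains grp then g else g.insert grp []
  if ((g.getD grp []).length : Int) < target then
    g.modify grp [] (fun l => l ++ [(PySem.Dict.mk mem).getD "Name" ""])
  else g

def stepB (dim : String) (g : PySem.Dict String (List String)) (mem : List (String × String)) : PySem.Dict String (List String) :=
  g.modify ((PySem.Dict.mk mem).getD dim "") [] (fun l => l ++ [(PySem.Dict.mk mem).getD "Name" ""])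

theorem contains_iff_get? (g : PySem.Dict String (List String)) (k : String) :
    g.contains k = true ↔ ∃ v, g.get? k = some v := by
  simp only [PySem.Dict.contains, PySem.Dict.get?, List.any_eq_true]
  constructor
  · rintro ⟨p, hp, hpk⟩
    rcases h2 : g.items.find? (fun p => p.1 == k) with _ | pr
    · exact absurd (List.find?_eq_none.mp h2 p hp hpk) (by simp)
    · exact ⟨pr.2, by simp [h2]⟩
  · rintro ⟨v, hv⟩
    rcases h2 : g.items.find? (fun p => p.1 == k) with _ | pr
    · simp [h2] at hv
    · exact ⟨pr, List.mem_of_find?_eq_some h2, (List.find?_eq_some_iff_append.mp h2).1⟩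

theorem stepA_capD (dim : String) (target : Int) (g : PySem.Dict String (List String))
    (hnd : g.keys.Nodup) (mem : List (String × String)) :
    stepA dim target (capD target.toNat g) mem = capD target.toNat (stepB dim g mem) := by
  set t := target.toNat with ht
  set grp := (PySem.Dict.mk mem).getD dim "" with hgrp
  set nm := (PySem.Dict.mk mem).getD "Name" "" with hnm
  set L := g.getD grp [] with hL
  have hB : stepB dim g mem = g.insert grp (L ++ [nm]) := by
    simp [stepB, PySem.Dict.modify, hgrp, hnm, hL]
  rw [hB, capD_insert]
  by_cases hc : g.contains grp = true
  · obtain ⟨v, hv⟩ := (contains_iff_get? g grp).mp hc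
    have hLv : L = v := by simp [hL, PySem.Dict.getD, hv]
    simp only [stepA, contains_capD, hc, if_pos, getD_capD, ← hL, ← hgrp, ← hnm]
    have hmin : (L.take t).length = min t L.length := List.length_take ..
    by_cases hlen : (((L.take t).length : Int) < target)
    · have h1 : L.length < t := by omega
      have htake : (L ++ [nm]).take t = L.take t ++ [nm] := by
        rw [List.take_append]
        congr 1
        have : t - L.length ≥ 1 := by omega
        cases h : t - L.length with
        | zero => omega
        | succ n => simp
      rw [if_pos hlen, htake]
      simp only [PySem.Dict.modify, getD_capD, ← hL]
    · rw [if_neg hlen]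
      have h1 : t ≤ L.length := by omega
      have htake : (L ++ [nm]).take t = L.take t := by
        rw [List.take_append]
        have : t - L.length = 0 := by omega
        simp [this]
      rw [htake]
      refine (insert_get?_self _ ?_ _ _ ?_).symm
      · rw [keys_capD]; exact hnd
      · rw [get?_capD, hv, hLv]; rfl
  · have hv : g.get? grp = none := by
      rcases h2 : g.get? grp with _ | v
      · rfl
      · exact absurd ((contains_iff_get? g grp).mpr ⟨v, h2⟩) (by simp [hc])
    have hLnil : L = [] := by simp [hL, PySem.Dict.getD, hv]
    simp only [stepA, contains_capD, hc, Bool.false_eq_true, if_false, ← hgrp, ← hnm]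
    rw [hLnil]
    have hgd : ((capD t g).insert grp []).getD grp [] = [] := by
      simp [PySem.Dict.getD, PySem.Dict.get?_insert_self]
    rw [hgd]
    by_cases hpos : ((0 : Int) < target)
    · have ht1 : 1 ≤ t := by rw [ht]; omega
      rw [if_pos (by simpa using hpos)]
      simp only [PySem.Dict.modify, hgd, PySem.Dict.insert_insert_self, List.nil_append]
      congr 1
      rw [List.take_of_length_le (by simpa using ht1)]
    · have ht0 : t = 0 := by omega
      rw [if_neg (by simpa using hpos)]
      rw [ht0]
      simp

theorem nodup_keys_stepB (dim : String) (g : PySem.Dict String (List String))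
    (hnd : g.keys.Nodup) (mem : List (String × String)) : (stepB dim g mem).keys.Nodup := by
  exact PySem.Dict.nodup_keys_insert _ _ _ hnd

theorem foldl_stepA_capD (dim : String) (target : Int) (pm : List (List (String × String))) :
    ∀ g : PySem.Dict String (List String), g.keys.Nodup →
    pm.foldl (stepA dim target) (capD target.toNat g) = capD target.toNat (pm.foldl (stepB dim) g) := by
  induction pm with
  | nil => intro g _; simp
  | cons mem rest ih =>
    intro g hnd
    simp only [List.foldl_cons]
    rw [stepA_capD dim target g hnd mem]
    exact ih (stepB dim g mem) (nodup_keys_stepB dim g hnd mem)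

theorem gen_committee_eq (pm : List (List (String × String))) (dim : String) (target : Int) :
    gen_committee pm dim target = (pm.foldl (stepA dim target) PySem.Dict.empty).items := rfl

-- The uncapped grouping dict stepB builds, characterised: its keys are the distinct
-- dimension values in order, its value at k is the filtered name list.
theorem nodup_keys_foldl_stepB (dim : String) (pm : List (List (String × String))) :
    (pm.foldl (stepB dim) PySem.Dict.empty).keys.Nodup := by
  exact PySem.Dict.nodup_keys_foldl_modify_key pm
    (fun mem => (PySem.Dict.mk mem).getD dim "") []
    (fun _ mem => (fun l => l ++ [(PySem.Dict.mk mem).getD "Name" ""]))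
    PySem.Dict.empty (by simp [pysem])

theorem keys_foldl_stepB (dim : String) (pm : List (List (String × String))) :
    (pm.foldl (stepB dim) PySem.Dict.empty).keys
      = PySem.Set.ofList (pm.map (fun mem => (PySem.Dict.mk mem).getD dim "")) := by
  rw [show (pm.foldl (stepB dim) PySem.Dict.empty)
      = pm.foldl (fun d mem => d.modify ((PySem.Dict.mk mem).getD dim "") []
          (fun l => l ++ [(PySem.Dict.mk mem).getD "Name" ""])) PySem.Dict.empty from rfl]
  rw [PySem.Dict.keys_foldl_modify_key]
  simp [pysem, PySem.Set.update_nil_left]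

theorem getD_foldl_stepB (dim : String) (pm : List (List (String × String))) (c : String) :
    (pm.foldl (stepB dim) PySem.Dict.empty).getD c []
      = ((pm.filter (fun mem => (PySem.Dict.mk mem).getD dim "" == c)).map
          (fun mem => (PySem.Dict.mk mem).getD "Name" "")) := by
  have h : pm.foldl (stepB dim) PySem.Dict.empty
      = ((pm.map (fun mem => ((PySem.Dict.mk mem).getD dim "", (PySem.Dict.mk mem).getD "Name" ""))).foldl
          (fun d p => d.modify p.1 [] (fun l => l ++ [p.2])) PySem.Dict.empty) := by
    rw [List.foldl_map]; rfl
  rw [h, PySem.Dict.getD_foldl_modify_append]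
  simp [List.filter_map, List.map_map, Function.comp_def]

-- B's first pass equals Set.ofList of the key sequence.
theorem seen_eq (dim : String) (pm : List (List (String × String))) :
    (pm.foldl (fun ks mem =>
        let g := (PySem.Dict.mk mem).getD dim ""
        if ks.contains g then ks else ks ++ [g]) ([] : List String))
      = PySem.Set.ofList (pm.map (fun mem => (PySem.Dict.mk mem).getD dim "")) := by
  rw [← PySem.Set.update_nil_left, PySem.Set.update_map_eq_foldl_add]
  rfl

-- ===== VERDICT (by name: the statement is the Claim_ definition above) =====
theorem gen_committee_spec : Claim_equal_gen_committee := by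
  intro pm dim target _ _
  unfold Spec_gen_committee
  have hmax : (max 0 target).toNat = target.toNat := by
    rcases le_total 0 target with h | h
    · rw [max_eq_right h]
    · rw [max_eq_left h]; omega
  rw [gen_committee_eq]
  have h := foldl_stepA_capD dim target pm PySem.Dict.empty (by simp [pysem])
  have hempty : capD target.toNat PySem.Dict.empty = PySem.Dict.empty := rfl
  rw [hempty] at h
  rw [h]
  set d := pm.foldl (stepB dim) PySem.Dict.empty with hd
  have hitems : (capD target.toNat d).items
      = d.items.map (fun p => (p.1, p.2.take target.toNat)) := rfl
  rw [hitems, PySem.Dict.items_eq_map_keys d (nodup_keys_foldl_stepB dim pm) [],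
      List.map_map]
  have halt : gen_committee_alt pm dim target
      = (pm.foldl (fun ks mem =>
            let g := (PySem.Dict.mk mem).getD dim ""
            if ks.contains g then ks else ks ++ [g]) ([] : List String)).map
          (fun g => (g, ((pm.filter
              (fun mem => (PySem.Dict.mk mem).getD dim "" == g)).map
              (fun mem => (PySem.Dict.mk mem).getD "Name" "")).take (max 0 target).toNat)) := rfl
  rw [halt, seen_eq, hmax,
      show d.keys = PySem.Set.ofList (pm.map (fun mem => (PySem.Dict.mk mem).getD dim ""))
        from keys_foldl_stepB dim pm]
  apply List.map_congr_left
  intro k _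
  show (k, (d.getD k []).take target.toNat) = _
  rw [
      show d.getD k [] = ((pm.filter (fun mem => (PySem.Dict.mk mem).getD dim "" == k)).map
          (fun mem => (PySem.Dict.mk mem).getD "Name" "")) from getD_foldl_stepB dim pm k]
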